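-- pv_equiv track=rewrite | github.com/ChrisCantReid623/Codefolio | infographic.py | count_by_category
-- ===== SOURCE A (Python) =====
-- def count_by_category(word_count_dict):
--     """
--     This function measures the length of each word stored as a key in the dictionary parameter,
--     categorizes the word based on length (small, medium and large) and totals the words in each
--     category.
--
--     ---Parameters---
--     word_count_dict: a dictionary containing unique words and their frequencies as key:value pairs
--     """
--     category_counter_dict = {'small': 0, 'medium': 0, 'large': 0}
--     for key, value in word_count_dict.items():
--         if len(key) <= 4:
--             category_counter_dict['small'] += value
--         elif len(key) <= 7:
--             category_counter_dict['medium'] += value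
--         elif len(key) >= 8:
--             category_counter_dict['large'] += value
--     return category_counter_dict
-- ===== SOURCE B (Python) =====
-- def count_by_category(word_count_dict):
--     """Three independent filtered sums instead of one classifying loop."""
--     small = sum(v for k, v in word_count_dict.items() if len(k) <= 4)
--     medium = sum(v for k, v in word_count_dict.items() if 5 <= len(k) <= 7)
--     large = sum(v for k, v in word_count_dict.items() if len(k) >= 8)
--     return {'small': small, 'medium': medium, 'large': large}
-- ===== Notes on version B (the rewrite author's own statement) =====
-- stated objective: simpler
-- what changed: Replaces the single classifying loop that mutates a counter dict with three independent filtered sums over the items, one per category, assembled into the result dict at the end.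
import Mathlib
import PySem

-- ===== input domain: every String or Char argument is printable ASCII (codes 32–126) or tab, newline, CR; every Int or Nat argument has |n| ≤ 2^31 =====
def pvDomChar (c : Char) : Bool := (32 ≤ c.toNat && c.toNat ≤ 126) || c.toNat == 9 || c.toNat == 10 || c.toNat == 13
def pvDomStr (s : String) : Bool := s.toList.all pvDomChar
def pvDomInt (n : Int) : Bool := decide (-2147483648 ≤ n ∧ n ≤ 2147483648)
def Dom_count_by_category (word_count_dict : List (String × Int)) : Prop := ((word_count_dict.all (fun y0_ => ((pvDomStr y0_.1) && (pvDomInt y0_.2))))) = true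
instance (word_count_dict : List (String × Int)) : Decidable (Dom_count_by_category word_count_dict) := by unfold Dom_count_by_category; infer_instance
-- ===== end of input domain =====

-- B computes the three bucket totals as three independent filtered sums instead of A's
-- single classifying loop over a mutable counter dict (objective: simpler).

-- ===== PORT A =====
def count_by_category (word_count_dict : List (String × Int)) : List (String × Int) :=
  let init : PySem.Dict String Int := PySem.Dict.ofList [("small", 0), ("medium", 0), ("large", 0)]
  (word_count_dict.foldl
    (fun acc kv =>
      if PySem.Str.len kv.1 ≤ 4 then acc.modify "small" 0 (· + kv.2)
      else if PySem.Str.len kv.1 ≤ 7 then acc.modify "medium" 0 (· + kv.2)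
      else if PySem.Str.len kv.1 ≥ 8 then acc.modify "large" 0 (· + kv.2)
      else acc)
    init).items

-- ===== PORT B =====
def count_by_category_alt (word_count_dict : List (String × Int)) : List (String × Int) :=
  let small := ((word_count_dict.filter (fun p => PySem.Str.len p.1 ≤ 4)).map Prod.snd).sum
  let medium := ((word_count_dict.filter (fun p => 5 ≤ PySem.Str.len p.1 ∧ PySem.Str.len p.1 ≤ 7)).map Prod.snd).sum
  let large := ((word_count_dict.filter (fun p => PySem.Str.len p.1 ≥ 8)).map Prod.snd).sum
  [("small", small), ("medium", medium), ("large", large)]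

-- ===== PRECONDITION & SPEC =====
def Spec_count_by_category (word_count_dict : List (String × Int)) (out : List (String × Int)) : Prop := out = count_by_category_alt word_count_dict
instance (word_count_dict : List (String × Int)) (out : List (String × Int)) : Decidable (Spec_count_by_category word_count_dict out) := by unfold Spec_count_by_category; infer_instance

-- ===== CLAIM (what is proved, stated in full; the proofs are below) =====
def Claim_equal_count_by_category : Prop := ∀ (word_count_dict : List (String × Int)), Dom_count_by_category word_count_dict → Spec_count_by_category word_count_dict (count_by_category word_count_dict)

-- ===== LEMMAS AND PROOFS =====

theorem cbc_invariant (l : List (String × Int)) (a b c : Int) :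
    (l.foldl
      (fun acc kv =>
        if PySem.Str.len kv.1 ≤ 4 then acc.modify "small" 0 (· + kv.2)
        else if PySem.Str.len kv.1 ≤ 7 then acc.modify "medium" 0 (· + kv.2)
        else if PySem.Str.len kv.1 ≥ 8 then acc.modify "large" 0 (· + kv.2)
        else acc)
      (PySem.Dict.ofList [("small", a), ("medium", b), ("large", c)] : PySem.Dict String Int)).items
    = [("small", a + ((l.filter (fun p => PySem.Str.len p.1 ≤ 4)).map Prod.snd).sum),
       ("medium", b + ((l.filter (fun p => 5 ≤ PySem.Str.len p.1 ∧ PySem.Str.len p.1 ≤ 7)).map Prod.snd).sum),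
       ("large", c + ((l.filter (fun p => PySem.Str.len p.1 ≥ 8)).map Prod.snd).sum)] := by
  induction l generalizing a b c with
  | nil =>
    simp [PySem.Dict.ofList, PySem.Dict.update, PySem.Dict.insert, PySem.Dict.contains,
      PySem.Dict.empty, List.foldl]
  | cons hd tl ih =>
    rcases hd with ⟨k, v⟩
    by_cases h4 : PySem.Str.len k ≤ 4
    · have hstep : ((PySem.Dict.ofList [("small", a), ("medium", b), ("large", c)] : PySem.Dict String Int).modify "small" 0 (· + v))
          = PySem.Dict.ofList [("small", a + v), ("medium", b), ("large", c)] := by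
        simp [PySem.Dict.modify, PySem.Dict.ofList, PySem.Dict.insert, PySem.Dict.get?,
          PySem.Dict.getD, PySem.Dict.contains, PySem.Dict.empty, PySem.Dict.update, List.foldl]
      simp only [List.foldl_cons, h4, if_pos, List.filter_cons]
      rw [hstep, ih]
      simp only [PySem.Str.len_eq, String.length_toList] at h4
      have H4 : k.length ≤ 4 := by omega
      have H5 : ¬ (5 ≤ k.length ∧ k.length ≤ 7) := by omega
      have H8 : ¬ (8 ≤ k.length) := by omega
      simp [H5, H8, add_assoc]
    · by_cases h7 : PySem.Str.len k ≤ 7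
      · have hstep : ((PySem.Dict.ofList [("small", a), ("medium", b), ("large", c)] : PySem.Dict String Int).modify "medium" 0 (· + v))
            = PySem.Dict.ofList [("small", a), ("medium", b + v), ("large", c)] := by
          simp [PySem.Dict.modify, PySem.Dict.ofList, PySem.Dict.insert, PySem.Dict.get?,
            PySem.Dict.getD, PySem.Dict.contains, PySem.Dict.empty, PySem.Dict.update, List.foldl]
        simp only [List.foldl_cons, h4, if_neg, h7, if_pos, not_false_iff]
        rw [hstep, ih]
        simp only [PySem.Str.len_eq, String.length_toList] at h4 h7
        have H4 : ¬ (k.length ≤ 4) := by omega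
        have H5 : 5 ≤ k.length ∧ k.length ≤ 7 := by omega
        have H8 : ¬ (8 ≤ k.length) := by omega
        simp [H4, H5, H8, add_assoc]
      · have h8 : PySem.Str.len k ≥ 8 := by omega
        have hstep : ((PySem.Dict.ofList [("small", a), ("medium", b), ("large", c)] : PySem.Dict String Int).modify "large" 0 (· + v))
            = PySem.Dict.ofList [("small", a), ("medium", b), ("large", c + v)] := by
          simp [PySem.Dict.modify, PySem.Dict.ofList, PySem.Dict.insert, PySem.Dict.get?,
            PySem.Dict.getD, PySem.Dict.contains, PySem.Dict.empty, PySem.Dict.update, List.foldl]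
        simp only [List.foldl_cons, h4, h7, h8, if_neg, if_pos, ge_iff_le, not_false_iff]
        rw [hstep, ih]
        simp only [PySem.Str.len_eq, String.length_toList] at h4 h7 h8
        have H4 : ¬ (k.length ≤ 4) := by omega
        have H5 : ¬ (5 ≤ k.length ∧ k.length ≤ 7) := by omega
        have H8 : 8 ≤ k.length := by omega
        simp [H4, H5, H8, add_assoc]

-- ===== VERDICT (by name: the statement is the Claim_ definition above) =====
theorem count_by_category_spec : Claim_equal_count_by_category := by
  intro l _
  unfold Spec_count_by_category count_by_category count_by_category_alt
  rw [cbc_invariant]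
  simp
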